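-- pv_equiv track=rewrite | github.com/sukhpreet1910/Coding-Practice | python/day_2/remove_the_min.py | remove_smallest
-- ===== SOURCE A (Python) =====
-- def remove_smallest(numbers):
--
--     if len(numbers) == 0:
--         return []
--
--     smallest_index = 0
--     for i, n in enumerate(numbers):
--         if numbers[i] < numbers[smallest_index]:
--             smallest_index = i
--
--
--     # for i, n in enumerate(numbers):
--     #     if i != index:
--     #         new.append(n)
--
--     return numbers[:smallest_index] + numbers[smallest_index + 1:]
-- ===== SOURCE B (Python) =====
-- def remove_smallest(numbers):
--     if not numbers:
--         return []
--     m = min(numbers)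
--     out = []
--     removed = False
--     for n in numbers:
--         if not removed and n == m:
--             removed = True
--         else:
--             out.append(n)
--     return out
-- ===== Notes on version B (the rewrite author's own statement) =====
-- stated objective: alternative
-- what changed: Instead of tracking an argmin index and slicing around it, B computes the minimum value once and then rebuilds the list in a single flag-carrying pass that skips the first element equal to that minimum; no indices or slices are used.
import Mathlib
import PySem

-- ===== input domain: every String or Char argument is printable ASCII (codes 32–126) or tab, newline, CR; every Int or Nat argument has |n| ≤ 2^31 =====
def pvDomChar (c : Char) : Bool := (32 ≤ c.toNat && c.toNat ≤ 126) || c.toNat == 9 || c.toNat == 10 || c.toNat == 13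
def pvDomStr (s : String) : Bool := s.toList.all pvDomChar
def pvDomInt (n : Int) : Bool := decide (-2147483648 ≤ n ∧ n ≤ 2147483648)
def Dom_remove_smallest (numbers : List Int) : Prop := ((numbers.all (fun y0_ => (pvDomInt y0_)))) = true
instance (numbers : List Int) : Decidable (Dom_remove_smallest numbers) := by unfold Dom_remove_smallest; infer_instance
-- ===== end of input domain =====

-- B replaces A's argmin-index-and-slice scheme with min() once plus a single flag-carrying rebuild pass that skips the first element equal to the minimum; same O(n) cost.


-- ===== PORT A =====
-- `numbers[i]` / `numbers[smallest_index]` are always in range here, so pyGetD with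
-- an (unreachable) default 0 is exact for Python's indexing.
def remove_smallest (numbers : List Int) : List Int :=
  if numbers.length = 0 then []
  else
    let si : Int := (PySem.List.enumerate numbers).foldl
      (fun si p =>
        if PySem.List.pyGetD numbers p.1 0 < PySem.List.pyGetD numbers si 0 then p.1 else si) 0
    PySem.List.slice numbers none (some si) ++ PySem.List.slice numbers (some (si + 1)) none

-- ===== PORT B =====
def remove_smallest_alt (numbers : List Int) : List Int :=
  if numbers = [] then []
  else
    match PySem.List.min? numbers (fun x => x) with
    | none => []          -- unreachable: the list is nonempty
    | some m =>
      (numbers.foldl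
        (fun (s : Bool × List Int) n =>
          if s.1 = false ∧ n = m then (true, s.2) else (s.1, s.2 ++ [n]))
        (false, [])).2

-- ===== PRECONDITION & SPEC =====
def Spec_remove_smallest (numbers : List Int) (out : List Int) : Prop := out = remove_smallest_alt numbers
instance (numbers : List Int) (out : List Int) : Decidable (Spec_remove_smallest numbers out) := by unfold Spec_remove_smallest; infer_instance

-- ===== CLAIM (what is proved, stated in full; the proofs are below) =====
def Claim_equal_remove_smallest : Prop := ∀ (numbers : List Int), Dom_remove_smallest numbers → Spec_remove_smallest numbers (remove_smallest numbers)

-- ===== LEMMAS AND PROOFS =====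

-- "k is the index of the first occurrence of the minimum of xs"
def FirstMin (xs : List Int) (k : Nat) : Prop :=
  k < xs.length ∧ (∀ y ∈ xs, xs.getD k 0 ≤ y) ∧ (∀ j, j < k → xs.getD k 0 < xs.getD j 0)

def stepA (xs : List Int) : Int → Int × Int → Int :=
  fun si p =>
    if PySem.List.pyGetD xs p.1 0 < PySem.List.pyGetD xs si 0 then p.1 else si

-- folding over pairs whose indices lie inside xs reads only the xs-part of xs ++ [x]
theorem foldA_congr (xs : List Int) (x : Int) :
    ∀ (l : List (Int × Int)) (si : Nat),
      (∀ p ∈ l, ∃ j : Nat, p.1 = (j : Int) ∧ j < xs.length) → si < xs.length →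
      l.foldl (stepA (xs ++ [x])) (si : Int) = l.foldl (stepA xs) (si : Int) := by
  intro l
  induction l with
  | nil => intro si _ _; rfl
  | cons p t ih =>
    intro si hmem hsi
    obtain ⟨j, hj, hjlt⟩ := hmem p (List.mem_cons_self ..)
    have hget : ∀ (i : Nat), i < xs.length →
        PySem.List.pyGetD (xs ++ [x]) (i : Int) 0 = PySem.List.pyGetD xs (i : Int) 0 := by
      intro i hi
      rw [PySem.List.pyGetD_natCast, PySem.List.pyGetD_natCast,
        List.getD_eq_getElem _ _ (by simp; omega), List.getD_eq_getElem _ _ hi]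
      simp [List.getElem_append_left hi]
    simp only [List.foldl_cons]
    have hstep : stepA (xs ++ [x]) (si : Int) p = stepA xs (si : Int) p := by
      simp only [stepA, hj, hget j hjlt, hget si hsi]
    rw [hstep]
    simp only [stepA, hj]
    split
    · rw [show ((j : Int)) = ((j : Nat) : Int) from rfl]
      exact ih _ (fun q hq => hmem q (List.mem_cons_of_mem _ hq)) hjlt
    · exact ih _ (fun q hq => hmem q (List.mem_cons_of_mem _ hq)) hsi

def foldA (xs : List Int) : Int :=
  (PySem.List.enumerate xs).foldl (stepA xs) 0

theorem enumerate_fst_bound (xs : List Int) :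
    ∀ p ∈ PySem.List.enumerate xs, ∃ j : Nat, p.1 = (j : Int) ∧ j < xs.length := by
  intro p hp
  rw [PySem.List.mem_enumerate_iff] at hp
  obtain ⟨k, hk, rfl⟩ := hp
  exact ⟨k, by omega, hk⟩

theorem getD_append_left' (ys : List Int) (x : Int) (j : Nat) (hj : j < ys.length) :
    (ys ++ [x]).getD j 0 = ys.getD j 0 := by
  rw [List.getD_eq_getElem _ _ (by simp; omega), List.getD_eq_getElem _ _ hj]
  simp [List.getElem_append_left hj]

theorem getD_append_len' (ys : List Int) (x : Int) :
    (ys ++ [x]).getD ys.length 0 = x := by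
  rw [List.getD_eq_getElem _ _ (by simp)]
  simp

-- the invariant: A's fold computes the index of the first minimum
theorem foldA_firstMin : ∀ (xs : List Int), xs ≠ [] →
    ∃ k : Nat, foldA xs = (k : Int) ∧ FirstMin xs k := by
  intro xs
  induction xs using List.reverseRecOn with
  | nil => intro h; exact absurd rfl h
  | append_singleton ys x ih =>
    intro _
    rcases eq_or_ne ys [] with rfl | hne
    · refine ⟨0, ?_, ?_, ?_, ?_⟩
      · simp [foldA, PySem.List.enumerate, stepA]
      · simp
      · intro y hy; simp at hy; simp [hy]
      · intro j hj; omega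
    · obtain ⟨k, hfold, hk, hmin, hfst⟩ := ih hne
      have hgetk : PySem.List.pyGetD (ys ++ [x]) (k : Int) 0 = ys.getD k 0 := by
        rw [PySem.List.pyGetD_natCast]; exact getD_append_left' ys x k hk
      have hgetlen : PySem.List.pyGetD (ys ++ [x]) ((ys.length : Nat) : Int) 0 = x := by
        rw [PySem.List.pyGetD_natCast]; exact getD_append_len' ys x
      have hsi0 : 0 < ys.length := by
        cases ys with | nil => exact absurd rfl hne | cons a t => simp
      have hinner : (PySem.List.enumerate ys).foldl (stepA (ys ++ [x])) 0 = foldA ys := by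
        have h := foldA_congr ys x (PySem.List.enumerate ys) 0 (enumerate_fst_bound ys) hsi0
        simpa [foldA] using h
      have hfold' : foldA (ys ++ [x]) =
          stepA (ys ++ [x]) (foldA ys) ((ys.length : Int), x) := by
        unfold foldA
        rw [show PySem.List.enumerate (ys ++ [x]) = PySem.List.enumerate (ys ++ [x]) 0 from rfl,
          PySem.List.enumerate_append, List.foldl_append, hinner,
          PySem.List.enumerate_cons, PySem.List.enumerate_nil]
        simp only [List.foldl_cons, List.foldl_nil, zero_add]
        rfl
      rw [hfold] at hfold'
      simp only [stepA, hgetlen] at hfold'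
      rw [hgetk] at hfold'
      by_cases hlt : x < ys.getD k 0
      · rw [if_pos hlt] at hfold'
        refine ⟨ys.length, hfold', by simp, ?_, ?_⟩
        · intro y hy
          rw [getD_append_len']
          rcases List.mem_append.mp hy with h | h
          · exact le_of_lt (lt_of_lt_of_le hlt (hmin y h))
          · simp at h; omega
        · intro j hj
          rw [getD_append_len', getD_append_left' ys x j hj]
          have hmem : ys.getD j 0 ∈ ys := by
            rw [List.getD_eq_getElem _ _ hj]; exact List.getElem_mem hj
          have := hmin _ hmem
          omega
      · rw [if_neg hlt] at hfold'
        refine ⟨k, hfold', by simp; omega, ?_, ?_⟩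
        · intro y hy
          rw [getD_append_left' ys x k hk]
          rcases List.mem_append.mp hy with h | h
          · exact hmin y h
          · simp at h; subst h; omega
        · intro j hj
          rw [getD_append_left' ys x k hk, getD_append_left' ys x j (by omega)]
          exact hfst j hj

def stepB (m : Int) : Bool × List Int → Int → Bool × List Int :=
  fun s n => if s.1 = false ∧ n = m then (true, s.2) else (s.1, s.2 ++ [n])

-- once the flag is set, the pass just copies the rest
theorem foldB_true (m : Int) : ∀ (xs : List Int) (acc : List Int),
    xs.foldl (stepB m) (true, acc) = (true, acc ++ xs) := by
  intro xs
  induction xs with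
  | nil => intro acc; simp
  | cons h t ih =>
    intro acc
    simp only [List.foldl_cons, stepB]
    rw [if_neg (by simp)]
    simpa using ih (acc ++ [h])

-- the flag-carrying pass drops exactly the first occurrence of m
theorem foldB_spec (m : Int) : ∀ (xs : List Int) (k : Nat) (acc : List Int),
    k < xs.length → xs.getD k 0 = m → (∀ j, j < k → xs.getD j 0 ≠ m) →
    (xs.foldl (stepB m) (false, acc)).2 = acc ++ xs.take k ++ xs.drop (k + 1) := by
  intro xs
  induction xs with
  | nil => intro k acc hk _ _; simp at hk
  | cons h t ih =>
    intro k acc hk hval hfst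
    cases k with
    | zero =>
      simp only [List.getD] at hval
      simp only [List.foldl_cons, stepB]
      rw [if_pos (show True ∧ h = m from ⟨trivial, by simpa using hval⟩)]
      rw [foldB_true]
      simp
    | succ k' =>
      have hne : h ≠ m := by
        have := hfst 0 (Nat.succ_pos k')
        simpa using this
      simp only [List.foldl_cons, stepB]
      rw [if_neg (by simp [hne])]
      have := ih k' (acc ++ [h]) (by simpa using hk) (by simpa using hval)
        (fun j hj => by simpa using hfst (j + 1) (by omega))
      simpa using this

-- ===== VERDICT (by name: the statement is the Claim_ definition above) =====
theorem remove_smallest_spec : Claim_equal_remove_smallest := by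
  intro numbers _
  unfold Spec_remove_smallest remove_smallest remove_smallest_alt
  by_cases hnil : numbers = []
  · subst hnil; rfl
  · rw [if_neg (by simpa using hnil), if_neg hnil]
    obtain ⟨k, hfold, hk, hmin, hfst⟩ := foldA_firstMin numbers hnil
    obtain ⟨m, hm⟩ : ∃ m, PySem.List.min? numbers (fun x => x) = some m := by
      cases h : PySem.List.min? numbers (fun x => x) with
      | none => exact absurd ((PySem.List.min?_eq_none_iff _ _).mp h) hnil
      | some m => exact ⟨m, rfl⟩
    have hmmem : m ∈ numbers := PySem.List.min?_mem hm
    have hkmem : numbers.getD k 0 ∈ numbers := by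
      rw [List.getD_eq_getElem _ _ hk]; exact List.getElem_mem hk
    have hkm : numbers.getD k 0 = m :=
      le_antisymm (hmin m hmmem) (PySem.List.min?_isMin hm _ hkmem)
    have hfst' : ∀ j, j < k → numbers.getD j 0 ≠ m := by
      intro j hj
      have := hfst j hj
      omega
    show PySem.List.slice numbers none (some (foldA numbers)) ++
        PySem.List.slice numbers (some (foldA numbers + 1)) none = _
    rw [hfold, hm, PySem.List.slice_to_natCast,
      show ((k : Int) + 1) = ((k + 1 : Nat) : Int) by push_cast; ring,
      PySem.List.slice_from_natCast]
    have hB : (match some m with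
        | none => ([] : List Int)
        | some m =>
          (numbers.foldl (fun (s : Bool × List Int) n =>
            if s.1 = false ∧ n = m then (true, s.2) else (s.1, s.2 ++ [n])) (false, [])).2)
        = (numbers.foldl (stepB m) (false, [])).2 := rfl
    rw [hB, foldB_spec m numbers k [] hk hkm hfst']
    simp
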